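-- pv_equiv track=rewrite | github.com/valentin-correa/UTN-2024 | UTN/1er año/AyED/Python/problema correa.py | letras_a
-- ===== SOURCE A (Python) =====
-- def letras_a(cadena):
--     cad1 = ""
--     for i in range(len(cadena)):
--         if cadena[i] in {"a", "A"} and (cadena[i-1] == " " or i == 0):
--             while i < len(cadena) and cadena[i] != " ":
--                 cad1 += cadena[i]
--                 i += 1
--             if i < len(cadena) and cadena[i] == " ":
--                 cad1 += " "
--
--     return cad1
-- ===== SOURCE B (Python) =====
-- def letras_a(cadena):
--     out = []
--     rest = cadena
--     while rest:
--         word, sep, rest = rest.partition(" ")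
--         if word[:1] in ("a", "A"):
--             out.append(word + sep)
--     return "".join(out)
-- ===== Notes on version B (the rewrite author's own statement) =====
-- stated objective: faster
-- what changed: Replaces the index walk with lookback cadena[i-1] and an inner character-copy while-loop building the result by repeated string concatenation with a word-at-a-time loop over str.partition, collecting whole kept words (with their single trailing space) in a list and joining once at the end.
import Mathlib
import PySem

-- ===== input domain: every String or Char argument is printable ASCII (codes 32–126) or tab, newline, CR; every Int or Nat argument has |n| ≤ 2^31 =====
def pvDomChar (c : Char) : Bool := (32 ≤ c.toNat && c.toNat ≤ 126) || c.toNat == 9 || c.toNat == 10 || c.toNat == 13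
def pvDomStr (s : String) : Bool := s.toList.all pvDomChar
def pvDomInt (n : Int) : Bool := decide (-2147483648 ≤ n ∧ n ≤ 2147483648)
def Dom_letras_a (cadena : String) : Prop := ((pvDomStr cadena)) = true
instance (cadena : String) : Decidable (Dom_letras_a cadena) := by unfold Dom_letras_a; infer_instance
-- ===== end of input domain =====

-- B replaces A's index walk (lookback cadena[i-1] + inner copy loop with repeated string
-- concatenation) by a word-at-a-time loop over str.partition joined once at the end
-- (measured faster in a timing run); return values proved equal on all inputs.

-- ===== PORT A =====
-- the inner 'while i < len and cadena[i] != " "' copy loop plus the trailing-space check,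
-- acting on the suffix cadena[i:]
def pvCopyA : List Char → String → String
  | [], acc => acc
  | c :: t, acc => if c = ' ' then acc.push ' ' else pvCopyA t (acc.push c)

def letras_a (cadena : String) : String :=
  let cs := cadena.toList
  (PySem.List.pyRange 0 cs.length 1).foldl (fun cad1 i =>
    -- i ∈ [0, len): cadena[i] and cadena[i-1] always in range (negative -1 wraps to the end)
    if (PySem.List.pyGetD cs i ' ' = 'a' ∨ PySem.List.pyGetD cs i ' ' = 'A') ∧
       (PySem.List.pyGetD cs (i - 1) ' ' = ' ' ∨ i = 0) then
      pvCopyA (cs.drop i.toNat) cad1      -- cs.drop i.toNat = cadena[i:], 0 ≤ i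
    else cad1) ""

-- ===== PORT B =====
-- the 'while rest:' loop of Source B: rest.partition(" ") ported step for step as
-- takeWhile/dropWhile (word, then the one-char separator if present), collecting the
-- kept pieces in order
def pvLoopB : List Char → List (List Char)
  | [] => []
  | c :: t =>
    let word := (c :: t).takeWhile (· ≠ ' ')
    let tail := (c :: t).dropWhile (· ≠ ' ')
    let sep := tail.take 1
    let rest := tail.drop 1
    (if word.take 1 = ['a'] ∨ word.take 1 = ['A'] then [word ++ sep] else []) ++ pvLoopB rest
  termination_by rest => rest.length
  decreasing_by
    by_cases hc : c = ' '
    · subst hc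
      have h1 : List.dropWhile (fun x => decide (x ≠ ' ')) (' ' :: t) = ' ' :: t := by
        simp [List.dropWhile]
      simp only [h1]
      simp
    · have h2 : List.dropWhile (fun x => decide (x ≠ ' ')) (c :: t)
          = List.dropWhile (fun x => decide (x ≠ ' ')) t := by
        simp [List.dropWhile, hc]
      simp only [h2]
      have h3 := List.length_dropWhile_le (fun x => decide (x ≠ ' ')) t
      have h4 : ((List.dropWhile (fun x => decide (x ≠ ' ')) t).drop 1).length
          ≤ (List.dropWhile (fun x => decide (x ≠ ' ')) t).length := by simp
      simp only [List.length_cons]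
      omega

def letras_a_alt (cadena : String) : String :=
  String.ofList ((pvLoopB cadena.toList).flatten)   -- "".join(out)

-- ===== PRECONDITION & SPEC =====
def Spec_letras_a (cadena : String) (out : String) : Prop := out = letras_a_alt cadena
instance (cadena : String) (out : String) : Decidable (Spec_letras_a cadena out) := by unfold Spec_letras_a; infer_instance

-- ===== CLAIM (what is proved, stated in full; the proofs are below) =====
def Claim_equal_letras_a : Prop := ∀ (cadena : String), Dom_letras_a cadena → Spec_letras_a cadena (letras_a cadena)

-- ===== LEMMAS AND PROOFS =====

-- the loop body of A's fold, named for the proofs (definitionally the lambda in letras_a)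
def pvStep (cs : List Char) (cad1 : String) (i : Int) : String :=
  if (PySem.List.pyGetD cs i ' ' = 'a' ∨ PySem.List.pyGetD cs i ' ' = 'A') ∧
     (PySem.List.pyGetD cs (i - 1) ' ' = ' ' ∨ i = 0) then
    pvCopyA (cs.drop i.toNat) cad1
  else cad1

theorem pvCopyA_toList (t : List Char) : ∀ acc : String,
    (pvCopyA t acc).toList
      = acc.toList ++ (t.takeWhile (· ≠ ' ') ++ (t.dropWhile (· ≠ ' ')).take 1) := by
  induction t with
  | nil => intro acc; simp [pvCopyA]
  | cons c t ih =>
    intro acc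
    by_cases hc : c = ' '
    · subst hc; simp [pvCopyA, List.takeWhile, List.dropWhile]
    · simp [pvCopyA, hc, List.takeWhile, List.dropWhile, ih]

theorem pvFoldl_id {α β : Type} (f : α → β → α) (l : List β)
    (h : ∀ a x, x ∈ l → f a x = a) : ∀ a, l.foldl f a = a := by
  induction l with
  | nil => intro a; simp
  | cons x l ih =>
    intro a
    simp only [List.foldl_cons]
    rw [h a x (by simp)]
    exact ih (fun a y hy => h a y (by simp [hy])) a

theorem pvFoldl_congr {α β : Type} (f g : α → β → α) (l : List β)
    (h : ∀ a x, x ∈ l → f a x = g a x) : ∀ a, l.foldl f a = l.foldl g a := by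
  induction l with
  | nil => intro a; simp
  | cons x l ih =>
    intro a
    simp only [List.foldl_cons]
    rw [h a x (by simp)]
    exact ih (fun a y hy => h a y (by simp [hy])) (g a x)

-- reading cs[p.length + j] through an appended prefix
theorem pvGetD_shift (p rest : List Char) (j : Nat) :
    PySem.List.pyGetD (p ++ rest) (((p.length + j : Nat) : Int)) ' ' = rest.getD j ' ' := by
  rw [PySem.List.pyGetD_natCast]
  rw [List.getD_append_right _ _ _ _ (by omega)]
  simp

-- shifting the fold past a prefix that ends in a space
theorem pvShift (q rest : List Char) : ∀ acc : String,
    (PySem.List.pyRange ((q ++ [' ']).length : Int) ((q ++ [' ']).length + rest.length) 1).foldl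
        (pvStep ((q ++ [' ']) ++ rest)) acc
      = (PySem.List.pyRange 0 (rest.length : Int) 1).foldl (pvStep rest) acc := by
  intro acc
  rw [PySem.List.pyRange_one, PySem.List.pyRange_one]
  have e1 : ((((q ++ [' ']).length : Int) + ↑rest.length) - ↑(q ++ [' ']).length).toNat
      = rest.length := by omega
  have e2 : ((rest.length : Int) - 0).toNat = rest.length := by omega
  rw [e1, e2, List.foldl_map, List.foldl_map]
  apply pvFoldl_congr
  intro a k hk
  have hklt : k < rest.length := List.mem_range.mp hk
  have hp : (q ++ [' ']).length = q.length + 1 := by simp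
  -- current element
  have hget : PySem.List.pyGetD ((q ++ [' ']) ++ rest) (((q ++ [' ']).length : Int) + ↑k) ' '
      = PySem.List.pyGetD rest ((0 : Int) + ↑k) ' ' := by
    have : (((q ++ [' ']).length : Int) + ↑k) = (((q ++ [' ']).length + k : Nat) : Int) := by
      push_cast; ring
    rw [this, pvGetD_shift]
    simp
  -- suffix cs[i:]
  have hdrop : ((q ++ [' ']) ++ rest).drop ((((q ++ [' ']).length : Int) + ↑k).toNat)
      = rest.drop (((0 : Int) + ↑k).toNat) := by
    have h1 : ((((q ++ [' ']).length : Int) + ↑k).toNat) = (q ++ [' ']).length + k := by omega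
    have h2 : (((0 : Int) + (k : Int)).toNat) = k := by omega
    rw [h1, h2, List.drop_append]
    simp
  -- previous element / i == 0 disjunct
  have hprev : (PySem.List.pyGetD ((q ++ [' ']) ++ rest) ((((q ++ [' ']).length : Int) + ↑k) - 1) ' ' = ' '
        ∨ (((q ++ [' ']).length : Int) + ↑k) = 0)
      ↔ (PySem.List.pyGetD rest (((0 : Int) + ↑k) - 1) ' ' = ' ' ∨ ((0 : Int) + ↑k) = 0) := by
    by_cases hk0 : k = 0
    · subst hk0
      apply iff_of_true
      · left
        have : ((((q ++ [' ']).length : Int) + (0 : Nat)) - 1) = ((q.length : Nat) : Int) := by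
          rw [hp]; push_cast; ring
        rw [this]
        have : q ++ [' '] ++ rest = q ++ (' ' :: rest) := by simp
        rw [this]
        have h0 : ((q.length : Nat) : Int) = (((q.length + 0 : Nat)) : Int) := by omega
        rw [h0, pvGetD_shift]
        simp
      · right; simp
    · have hk1 : 1 ≤ k := by omega
      have e3 : ((((q ++ [' ']).length : Int) + ↑k) - 1) = (((q ++ [' ']).length + (k - 1) : Nat) : Int) := by
        push_cast; omega
      have e4 : (((0 : Int) + ↑k) - 1) = (((k - 1 : Nat)) : Int) := by omega
      rw [e3, e4, pvGetD_shift, PySem.List.pyGetD_natCast]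
      constructor
      · rintro (h | h)
        · exact Or.inl h
        · exfalso; omega
      · rintro (h | h)
        · exact Or.inl h
        · exfalso; omega
  simp only [pvStep, hget, hdrop, hprev]

-- the fold over the indices of the first word (and its trailing space, if any)
theorem pvHead (cs : List Char) (hne : cs ≠ []) : ∀ acc : String,
    (PySem.List.pyRange 0 (((cs.takeWhile (· ≠ ' ')).length
          + ((cs.dropWhile (· ≠ ' ')).take 1).length : Nat) : Int) 1).foldl (pvStep cs) acc
      = if (cs.takeWhile (· ≠ ' ')).take 1 = ['a'] ∨ (cs.takeWhile (· ≠ ' ')).take 1 = ['A'] then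
          pvCopyA cs acc
        else acc := by
  intro acc
  obtain ⟨c, t, rfl⟩ : ∃ c t, cs = c :: t := by
    cases cs with
    | nil => exact absurd rfl hne
    | cons c t => exact ⟨c, t, rfl⟩
  set word := (c :: t).takeWhile (· ≠ ' ') with hword
  set tail := (c :: t).dropWhile (· ≠ ' ') with htail
  have hwt : word ++ tail = c :: t := List.takeWhile_append_dropWhile
  set m : Nat := word.length + (tail.take 1).length with hm
  by_cases hc : c = ' '
  · -- empty first word: the single index 0 is a no-op
    have hw0 : word = [] := by subst hc; simp [hword, List.takeWhile]
    have ht0 : tail = ' ' :: t := by subst hc; simp [htail, List.dropWhile]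
    have hm1 : m = 1 := by simp [hm, hw0, ht0]
    rw [hm1]
    rw [PySem.List.pyRange_one]
    norm_num [List.range_one]
    simp [pvStep, hc, hw0, PySem.List.pyGetD_zero_cons]
  · -- first word starts with c ≠ ' '
    have hwcons : word = c :: t.takeWhile (· ≠ ' ') := by
      simp [hword, List.takeWhile, hc]
    have hm1 : 1 ≤ m := by simp [hm, hwcons]; omega
    rw [PySem.List.pyRange_one_cons (by exact_mod_cast hm1)]
    simp only [List.foldl_cons]
    have hstep0 : pvStep (c :: t) acc 0
        = if (c = 'a' ∨ c = 'A') then pvCopyA (c :: t) acc else acc := by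
      simp [pvStep, PySem.List.pyGetD_zero_cons]
    have hnoop : ∀ (a : String) (i : Int), i ∈ PySem.List.pyRange (0 + 1) (m : Int) 1 →
        pvStep (c :: t) a i = a := by
      intro a i hi
      rw [PySem.List.mem_pyRange_one] at hi
      have h1 : 1 ≤ i := by omega
      have h2 : i < (m : Int) := hi.2
      have hj : i = ((i.toNat : Nat) : Int) := by omega
      set j := i.toNat with hjdef
      have hj1 : 1 ≤ j := by omega
      have hjm : j < m := by omega
      by_cases hjw : j < word.length
      · -- inside the word: previous char is a word char, hence not ' ', and i ≠ 0
        have hprev : PySem.List.pyGetD (c :: t) (i - 1) ' ' ≠ ' ' := by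
          have e : i - 1 = (((j - 1 : Nat)) : Int) := by omega
          rw [e, PySem.List.pyGetD_natCast]
          rw [← hwt, List.getD_append _ _ _ _ (by omega)]
          rw [List.getD_eq_getElem _ _ (by omega)]
          have hmem : word[j-1] ∈ word := List.getElem_mem _
          have hmem2 : word[j-1] ∈ (c :: t).takeWhile (· ≠ ' ') := hmem
          have := List.mem_takeWhile_imp hmem2
          simpa using this
        simp only [pvStep]
        rw [if_neg]
        rintro ⟨-, (h | h)⟩
        · exact hprev h
        · omega
      · -- at the separating space: the current char is ' ', not 'a'/'A'
        have hjeq : j = word.length := by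
          have : (tail.take 1).length ≤ 1 := by
            have := List.length_take_le 1 tail
            omega
          omega
        have htne : tail ≠ [] := by
          intro h0
          rw [h0] at hm
          simp at hm
          omega
        obtain ⟨d, t2, htleq⟩ : ∃ d t2, tail = d :: t2 := by
          cases htl : tail with
          | nil => exact absurd htl htne
          | cons d t2 => exact ⟨d, t2, rfl⟩
        have hd : d = ' ' := by
          have h := List.head?_dropWhile_not (fun x : Char => decide (x ≠ ' ')) (c :: t)
          rw [← htail, htleq] at h
          simp at h
          exact h
        have hcur : PySem.List.pyGetD (c :: t) i ' ' = ' ' := by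
          rw [hj, PySem.List.pyGetD_natCast]
          rw [← hwt, List.getD_append_right _ _ _ _ (by omega), hjeq]
          simp [htleq, hd]
        simp only [pvStep]
        rw [if_neg]
        rintro ⟨(h | h), -⟩ <;> rw [hcur] at h <;> simp at h
    rw [pvFoldl_id _ _ hnoop]
    rw [hstep0]
    by_cases hca : c = 'a' ∨ c = 'A'
    · rw [if_pos hca, if_pos]
      rw [hwcons]
      simpa using hca
    · rw [if_neg hca, if_neg]
      rw [hwcons]
      simpa using hca

theorem letras_a_main_aux : ∀ (n : Nat) (cs : List Char), cs.length ≤ n → ∀ acc,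
    ((PySem.List.pyRange 0 cs.length 1).foldl (pvStep cs) acc).toList
      = acc.toList ++ (pvLoopB cs).flatten := by
  intro n
  induction n with
  | zero =>
    intro cs hcs acc
    have : cs = [] := List.length_eq_zero_iff.mp (by omega)
    subst this
    simp [pvLoopB]
  | succ n ih =>
    intro cs hcs acc
    cases hcseq : cs with
    | nil => simp [pvLoopB]
    | cons c t =>
    subst hcseq
    set word := (c :: t).takeWhile (· ≠ ' ') with hword
    set tail := (c :: t).dropWhile (· ≠ ' ') with htail
    have hwt : word ++ tail = c :: t := List.takeWhile_append_dropWhile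
    have hloopB : pvLoopB (c :: t)
        = (if word.take 1 = ['a'] ∨ word.take 1 = ['A'] then [word ++ tail.take 1] else [])
          ++ pvLoopB (tail.drop 1) := by
      rw [pvLoopB]
    have hlen : word.length + (tail.take 1).length ≤ (c :: t).length := by
      have h1 : (tail.take 1).length ≤ tail.length := by rw [List.length_take]; omega
      have h2 : word.length + tail.length = (c :: t).length := by
        rw [← hwt]; simp
      omega
    have hsplit := PySem.List.pyRange_one_append 0
        ((word.length + (tail.take 1).length : Nat) : Int) (((c :: t).length : Nat) : Int)
        (by omega) (by exact_mod_cast hlen)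
    rw [hsplit, List.foldl_append, pvHead (c :: t) (by simp)]
    set acc1 := if word.take 1 = ['a'] ∨ word.take 1 = ['A'] then pvCopyA (c :: t) acc else acc
      with hacc1
    have hacc1L : acc1.toList
        = acc.toList ++ (if word.take 1 = ['a'] ∨ word.take 1 = ['A'] then word ++ tail.take 1 else []) := by
      rw [hacc1]
      by_cases hca : word.take 1 = ['a'] ∨ word.take 1 = ['A']
      · rw [if_pos hca, if_pos hca, pvCopyA_toList]
      · rw [if_neg hca, if_neg hca]
        simp
    cases htl : tail with
    | nil =>
      -- no space after the first word: the second index range is empty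
      have hwt2 : word = c :: t := by rw [htl] at hwt; simpa using hwt
      have hge : (c :: t).length ≤ word.length + (List.take 1 ([] : List Char)).length := by
        rw [← hwt2]; simp
      have hnil2 : PySem.List.pyRange ((word.length + (List.take 1 ([] : List Char)).length : Nat) : Int)
          (((c :: t).length : Nat) : Int) 1 = [] :=
        PySem.List.pyRange_one_eq_nil (by exact_mod_cast hge)
      rw [hnil2, List.foldl_nil]
      rw [htl] at hacc1L hloopB
      rw [hacc1L, hloopB]
      simp only [List.drop_nil, List.take_nil]
      by_cases hca : word.take 1 = ['a'] ∨ word.take 1 = ['A']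
      · rw [if_pos hca, if_pos hca]; simp [pvLoopB]
      · rw [if_neg hca, if_neg hca]; simp [pvLoopB]
    | cons d t2 =>
      have hd : d = ' ' := by
        have h := List.head?_dropWhile_not (fun x : Char => decide (x ≠ ' ')) (c :: t)
        rw [← htail, htl] at h
        simp at h
        exact h
      subst hd
      rw [htl] at hacc1L hloopB
      have hcs2 : c :: t = (word ++ [' ']) ++ t2 := by
        rw [← hwt, htl]; simp
      have hm2 : word.length + (List.take 1 (' ' :: t2)).length = (word ++ [' ']).length := by simp
      have hlen3 : ((c :: t).length : Int) = ((word ++ [' ']).length : Int) + (t2.length : Int) := by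
        rw [hcs2]; push_cast [List.length_append]; omega
      rw [hm2, hlen3]
      have hshift := pvShift word t2 acc1
      rw [show pvStep (c :: t) = pvStep ((word ++ [' ']) ++ t2) from by rw [← hcs2]]
      rw [hshift]
      have ht2len : t2.length ≤ n := by
        have : (c :: t).length = word.length + 1 + t2.length := by
          rw [hcs2]; simp; omega
        omega
      rw [ih t2 ht2len acc1]
      rw [hacc1L, hloopB]
      by_cases hca : word.take 1 = ['a'] ∨ word.take 1 = ['A']
      · rw [if_pos hca, if_pos hca]; simp
      · rw [if_neg hca, if_neg hca]; simp

theorem letras_a_main : ∀ cs acc,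
    ((PySem.List.pyRange 0 cs.length 1).foldl (pvStep cs) acc).toList
      = acc.toList ++ (pvLoopB cs).flatten :=
  fun cs acc => letras_a_main_aux cs.length cs (le_refl _) acc

-- ===== VERDICT (by name: the statement is the Claim_ definition above) =====
theorem letras_a_spec : Claim_equal_letras_a := by
  intro cadena _
  unfold Spec_letras_a letras_a letras_a_alt
  apply String.ext
  have h := letras_a_main cadena.toList ""
  simpa [pvStep] using h
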